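-- pv_equiv track=rewrite | github.com/prendradjaja/toys | n-queens/common.py | no_diagonal_attacks
-- ===== SOURCE A (Python) =====
-- def no_diagonal_attacks(matrix):
--     n = len(matrix)
--     count_diagonals = 2 * n - 1
--     for d in range(count_diagonals):
--         if sum(northeast_diagonal(matrix, d)) > 1:
--             return False
--         if sum(southeast_diagonal(matrix, d)) > 1:
--             return False
--     return True
--
-- def northeast_diagonal(matrix, d):
--     for r, c in northeast_diagonal_positions(matrix, d):
--         yield matrix[r][c]
--
-- def southeast_diagonal(matrix, d):
--     for r, c in southeast_diagonal_positions(matrix, d):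
--         yield matrix[r][c]
--
-- def northeast_diagonal_positions(matrix, d):
--     '''
--     e.g. for a 4x4 matrix, the diagonals are numbered like so:
--
--     0 1 2 3
--     1 2 3 4
--     2 3 4 5
--     3 4 5 6
--     '''
--     # r + c == d
--     n = len(matrix)
--     if d < n:
--         curr = (d, 0)
--         while curr[0] >= 0:
--             yield curr
--             curr = addvec(curr, (-1, 1))
--     else:
--         curr = (n - 1, d - (n - 1))
--         while curr[1] < n:
--             yield curr
--             curr = addvec(curr, (-1, 1))
--
-- def southeast_diagonal_positions(matrix, d):
--     '''
--     e.g. for a 4x4 matrix, the diagonals are numbered like so: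
--
--     3 4 5 6
--     2 3 4 5
--     1 2 3 4
--     0 1 2 3
--     '''
--     n = len(matrix)
--     for r, c in northeast_diagonal_positions(matrix, d):
--         r = n - 1 - r
--         yield (r, c)
--
-- def addvec(a, b):
--     return tuple(x+y for x,y in zip(a,b))
-- ===== SOURCE B (Python) =====
-- def no_diagonal_attacks(matrix):
--     # One cell-major pass over the n-column board: bucket each cell's value by its
--     # two diagonal keys, then check every diagonal's sum is <= 1.
--     n = len(matrix)
--     ne = {}
--     se = {}
--     for r in range(n):
--         for c, v in enumerate(matrix[r][:n]):
--             ne[r + c] = ne.get(r + c, 0) + v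
--             se[(n - 1 - r) + c] = se.get((n - 1 - r) + c, 0) + v
--     return all(v <= 1 for v in ne.values()) and all(v <= 1 for v in se.values())
-- ===== Notes on version B (the rewrite author's own statement) =====
-- stated objective: simpler
-- what changed: Replaces A's diagonal-by-diagonal traversal through four generator helpers with one row-major pass over the board that buckets each cell's value into two dicts keyed by its NE/SE diagonal numbers, then checks every bucket sum is <= 1.
-- outside the precondition, e.g. on no_diagonal_attacks([[0, 5], [0]]): A returns False, B returns False
import Mathlib
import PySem

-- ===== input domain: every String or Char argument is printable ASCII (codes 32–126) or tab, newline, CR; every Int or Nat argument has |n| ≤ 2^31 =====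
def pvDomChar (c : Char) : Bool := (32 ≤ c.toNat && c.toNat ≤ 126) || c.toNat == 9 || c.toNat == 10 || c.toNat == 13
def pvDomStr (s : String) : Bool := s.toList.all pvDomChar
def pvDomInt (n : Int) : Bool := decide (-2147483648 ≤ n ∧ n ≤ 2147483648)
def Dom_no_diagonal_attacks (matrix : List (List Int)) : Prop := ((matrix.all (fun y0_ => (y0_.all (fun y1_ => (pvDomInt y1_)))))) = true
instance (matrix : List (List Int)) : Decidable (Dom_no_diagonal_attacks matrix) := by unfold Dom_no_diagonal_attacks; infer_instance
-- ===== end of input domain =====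

-- B replaces A's diagonal-by-diagonal generator traversal with one cell-major pass
-- that buckets cell values by their two diagonal keys (objective: simpler).

-- ===== PORT A =====

-- matrix[r][c] (in range wherever A evaluates it on inputs admitted by Pre_)
def pvG (matrix : List (List Int)) (p : Int × Int) : Int :=
  PySem.List.pyGetD (PySem.List.pyGetD matrix p.1 []) p.2 0

-- addvec(a, b) on pairs
def pvAddvec (a b : Int × Int) : Int × Int := (a.1 + b.1, a.2 + b.2)

-- 'while curr[0] >= 0: yield curr; curr = addvec(curr, (-1, 1))'
def pvNeLoop1 (curr : Int × Int) : List (Int × Int) :=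
  if h : 0 ≤ curr.1 then curr :: pvNeLoop1 (pvAddvec curr (-1, 1)) else []
termination_by (curr.1 + 1).toNat
decreasing_by simp [pvAddvec]; omega

-- 'while curr[1] < n: yield curr; curr = addvec(curr, (-1, 1))'
def pvNeLoop2 (n : Int) (curr : Int × Int) : List (Int × Int) :=
  if h : curr.2 < n then curr :: pvNeLoop2 n (pvAddvec curr (-1, 1)) else []
termination_by (n - curr.2).toNat
decreasing_by simp [pvAddvec]; omega

-- northeast_diagonal_positions(matrix, d) (it depends on matrix only through n = len(matrix))
def pvNePositions (n d : Int) : List (Int × Int) :=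
  if d < n then pvNeLoop1 (d, 0) else pvNeLoop2 n (n - 1, d - (n - 1))

-- southeast_diagonal_positions(matrix, d)
def pvSePositions (n d : Int) : List (Int × Int) :=
  (pvNePositions n d).map (fun p => (n - 1 - p.1, p.2))

-- northeast_diagonal / southeast_diagonal: the cell values at a list of positions
def pvDiag (matrix : List (List Int)) (ps : List (Int × Int)) : List Int :=
  ps.map (pvG matrix)

-- the 'for d in range(count_diagonals)' loop with its two early returns
def pvALoop (matrix : List (List Int)) (n : Int) : List Int → Bool
  | [] => true
  | d :: ds =>
      if (pvDiag matrix (pvNePositions n d)).sum > 1 then false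
      else if (pvDiag matrix (pvSePositions n d)).sum > 1 then false
      else pvALoop matrix n ds

def no_diagonal_attacks (matrix : List (List Int)) : Bool :=
  pvALoop matrix (matrix.length : Int)
    (PySem.List.pyRange 0 (2 * (matrix.length : Int) - 1) 1)

-- ===== PORT B =====

-- body of B's inner loop: add the cell value v = cv.2 at column c = cv.1 of row r
-- into the two diagonal buckets
def pvBStep (n r : Int) (st : PySem.Dict Int Int × PySem.Dict Int Int)
    (cv : Int × Int) : PySem.Dict Int Int × PySem.Dict Int Int :=
  (st.1.insert (r + cv.1) (st.1.getD (r + cv.1) 0 + cv.2),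
   st.2.insert ((n - 1 - r) + cv.1) (st.2.getD ((n - 1 - r) + cv.1) 0 + cv.2))

def no_diagonal_attacks_alt (matrix : List (List Int)) : Bool :=
  let n : Int := matrix.length
  let st := (PySem.List.pyRange 0 n 1).foldl
    (fun st r =>
      (PySem.List.enumerate
        (PySem.List.slice (PySem.List.pyGetD matrix r []) none (some n)) 0).foldl
        (pvBStep n r) st)
    (PySem.Dict.empty, PySem.Dict.empty)
  st.1.values.all (fun v => v ≤ 1) && st.2.values.all (fun v => v ≤ 1)

-- ===== PRECONDITION & SPEC =====

-- Pre_ admits square boards (every row at least len(matrix) long — A reads only the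
-- first len(matrix) columns) and, in addition, any matrix whose first cell exceeds 1
-- (there A returns False at diagonal 0 before reading anything else). It excludes the
-- remaining ragged matrices: there A raises IndexError, except when its diagonal scan
-- happens to hit a diagonal summing above 1 before reaching the first missing cell —
-- an order-of-scan accident that is not a closed-form condition on the input.
def Pre_no_diagonal_attacks (matrix : List (List Int)) : Prop :=
  (∀ row ∈ matrix, matrix.length ≤ row.length) ∨
  (matrix ≠ [] ∧ matrix.headD [] ≠ [] ∧ 1 < (matrix.headD []).headD 0)

instance (matrix : List (List Int)) : Decidable (Pre_no_diagonal_attacks matrix) := by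
  unfold Pre_no_diagonal_attacks; infer_instance

def pvWitness_no_diagonal_attacks : List (List Int) := [[1, 0], [0, 1]]

def Spec_no_diagonal_attacks (matrix : List (List Int)) (out : Bool) : Prop := out = no_diagonal_attacks_alt matrix
instance (matrix : List (List Int)) (out : Bool) : Decidable (Spec_no_diagonal_attacks matrix out) := by unfold Spec_no_diagonal_attacks; infer_instance

-- ===== CLAIM (what is proved, stated in full; the proofs are below) =====
def Claim_equal_no_diagonal_attacks : Prop := ∀ (matrix : List (List Int)), Dom_no_diagonal_attacks matrix → Pre_no_diagonal_attacks matrix → Spec_no_diagonal_attacks matrix (no_diagonal_attacks matrix)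

-- ===== LEMMAS AND PROOFS =====

-- ---- proof-side abbreviations ----

-- the key/value accumulation fold B performs on each dict
def pvSumKV (L : List (Int × Int)) (d : PySem.Dict Int Int) : PySem.Dict Int Int :=
  L.foldl (fun d p => d.insert p.1 (d.getD p.1 0 + p.2)) d

-- number of cells B visits in row r: len(matrix[r][:n])
def pvLenR (matrix : List (List Int)) (r : Int) : Int :=
  ((PySem.List.slice (PySem.List.pyGetD matrix r []) none (some (matrix.length : Int))).length : Int)

-- the cells B visits, row-major
def pvCells (matrix : List (List Int)) : List (Int × Int) :=
  (PySem.List.pyRange 0 (matrix.length : Int) 1).flatMap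
    (fun r => (PySem.List.pyRange 0 (pvLenR matrix r) 1).map (fun c => (r, c)))

-- the (key, value) stream fed to a dict
def pvKV (key : Int × Int → Int) (matrix : List (List Int)) : List (Int × Int) :=
  (pvCells matrix).map (fun p => (key p, pvG matrix p))

-- bucket sum at key k of a (key, value) stream
def pvBSum (L : List (Int × Int)) (k : Int) : Int :=
  ((L.filter (fun p => p.1 == k)).map (·.2)).sum

-- ---- A's position generators ----
theorem pv_mem_neLoop1 (curr q : Int × Int) :
    q ∈ pvNeLoop1 curr ↔ 0 ≤ q.1 ∧ q.1 ≤ curr.1 ∧ q.1 + q.2 = curr.1 + curr.2 := by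
  fun_induction pvNeLoop1 curr with
  | case1 curr h ih =>
      obtain ⟨cr, cc⟩ := curr
      obtain ⟨qa, qb⟩ := q
      simp only [pvAddvec] at ih ⊢
      rw [List.mem_cons, ih]
      simp only [Prod.mk.injEq]
      dsimp only at h ⊢
      omega
  | case2 curr h =>
      simp only [List.not_mem_nil, false_iff]
      omega

theorem pv_nodup_neLoop1 (curr : Int × Int) : (pvNeLoop1 curr).Nodup := by
  fun_induction pvNeLoop1 curr with
  | case1 curr h ih =>
      refine List.nodup_cons.2 ⟨?_, ih⟩
      intro hmem
      rw [pv_mem_neLoop1] at hmem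
      simp only [pvAddvec] at hmem
      omega
  | case2 curr h => simp

theorem pv_mem_neLoop2 (n : Int) (curr q : Int × Int) :
    q ∈ pvNeLoop2 n curr ↔ curr.2 ≤ q.2 ∧ q.2 < n ∧ q.1 + q.2 = curr.1 + curr.2 := by
  fun_induction pvNeLoop2 n curr with
  | case1 curr h ih =>
      obtain ⟨cr, cc⟩ := curr
      obtain ⟨qa, qb⟩ := q
      simp only [pvAddvec] at ih ⊢
      rw [List.mem_cons, ih]
      simp only [Prod.mk.injEq]
      dsimp only at h ⊢
      omega
  | case2 curr h =>
      simp only [List.not_mem_nil, false_iff]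
      omega

theorem pv_nodup_neLoop2 (n : Int) (curr : Int × Int) : (pvNeLoop2 n curr).Nodup := by
  fun_induction pvNeLoop2 n curr with
  | case1 curr h ih =>
      refine List.nodup_cons.2 ⟨?_, ih⟩
      intro hmem
      rw [pv_mem_neLoop2] at hmem
      simp only [pvAddvec] at hmem
      omega
  | case2 curr h => simp

theorem pv_mem_nePositions (n d : Int) (q : Int × Int) :
    q ∈ pvNePositions n d ↔ 0 ≤ q.1 ∧ q.1 < n ∧ 0 ≤ q.2 ∧ q.2 < n ∧ q.1 + q.2 = d := by
  unfold pvNePositions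
  split_ifs with h
  · rw [pv_mem_neLoop1]; dsimp only; omega
  · rw [pv_mem_neLoop2]; dsimp only; omega

theorem pv_nodup_nePositions (n d : Int) : (pvNePositions n d).Nodup := by
  unfold pvNePositions
  split_ifs with h
  · exact pv_nodup_neLoop1 _
  · exact pv_nodup_neLoop2 _ _

theorem pv_mem_sePositions (n d : Int) (q : Int × Int) :
    q ∈ pvSePositions n d ↔ 0 ≤ q.1 ∧ q.1 < n ∧ 0 ≤ q.2 ∧ q.2 < n ∧ (n - 1 - q.1) + q.2 = d := by
  obtain ⟨qa, qb⟩ := q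
  unfold pvSePositions
  rw [List.mem_map]
  constructor
  · rintro ⟨p, hp, hpq⟩
    rw [pv_mem_nePositions] at hp
    simp only [Prod.mk.injEq] at hpq
    dsimp only
    omega
  · intro hq
    dsimp only at hq
    refine ⟨(n - 1 - qa, qb), ?_, ?_⟩
    · rw [pv_mem_nePositions]; dsimp only; omega
    · simp only [Prod.mk.injEq, and_true]
      omega

theorem pv_nodup_sePositions (n d : Int) : (pvSePositions n d).Nodup := by
  refine (pv_nodup_nePositions n d).map ?_
  intro a b hab
  rw [Prod.ext_iff] at hab ⊢
  dsimp only at hab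
  omega

-- ---- A's main loop, characterised ----
theorem pvALoop_eq_all (matrix : List (List Int)) (n : Int) (ds : List Int) :
    pvALoop matrix n ds = ds.all (fun d =>
      decide ((pvDiag matrix (pvNePositions n d)).sum ≤ 1)
      && decide ((pvDiag matrix (pvSePositions n d)).sum ≤ 1)) := by
  induction ds with
  | nil => rfl
  | cons d ds ih =>
      by_cases h1 : (pvDiag matrix (pvNePositions n d)).sum > 1
      · simp [pvALoop, h1, show ¬ (pvDiag matrix (pvNePositions n d)).sum ≤ 1 by omega]
      · by_cases h2 : (pvDiag matrix (pvSePositions n d)).sum > 1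
        · simp [pvALoop, h1, h2, show ¬ (pvDiag matrix (pvSePositions n d)).sum ≤ 1 by omega]
        · simp [pvALoop, h1, h2, ih, show (pvDiag matrix (pvNePositions n d)).sum ≤ 1 by omega,
                show (pvDiag matrix (pvSePositions n d)).sum ≤ 1 by omega]

theorem pvA_true_iff (matrix : List (List Int)) :
    no_diagonal_attacks matrix = true ↔
      ∀ d ∈ PySem.List.pyRange 0 (2 * (matrix.length : Int) - 1) 1,
        (pvDiag matrix (pvNePositions (matrix.length : Int) d)).sum ≤ 1 ∧
        (pvDiag matrix (pvSePositions (matrix.length : Int) d)).sum ≤ 1 := by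
  unfold no_diagonal_attacks
  rw [pvALoop_eq_all, List.all_eq_true]
  simp only [Bool.and_eq_true, decide_eq_true_eq]

-- ---- B's dict folds, characterised ----
theorem pv_getD_sumKV (L : List (Int × Int)) (d : PySem.Dict Int Int) (k : Int) :
    (pvSumKV L d).getD k 0 = d.getD k 0 + pvBSum L k := by
  induction L generalizing d with
  | nil => simp [pvSumKV, pvBSum]
  | cons p L ih =>
      have hcons : pvSumKV (p :: L) d = pvSumKV L (d.insert p.1 (d.getD p.1 0 + p.2)) := rfl
      rw [hcons, ih, PySem.Dict.getD_insert]
      by_cases hk : k = p.1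
      · subst hk
        simp [pvBSum]
        ring
      · have hbk : (p.1 == k) = false := by
          simp only [beq_eq_false_iff_ne, ne_eq]
          exact fun h => hk h.symm
        simp [pvBSum, hbk, hk]

theorem pv_keys_sumKV (L : List (Int × Int)) :
    (pvSumKV L PySem.Dict.empty).keys = PySem.Set.ofList (L.map (·.1)) := by
  unfold pvSumKV
  rw [PySem.Dict.keys_foldl_insert_key L (·.1) (fun d p => d.getD p.1 0 + p.2) PySem.Dict.empty]
  rw [PySem.Dict.keys_empty, PySem.Set.ofList_eq_foldl]
  rfl

theorem pv_nodup_keys_sumKV (L : List (Int × Int)) :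
    (pvSumKV L PySem.Dict.empty).keys.Nodup := by
  unfold pvSumKV
  exact PySem.Dict.nodup_keys_foldl_insert_key L (·.1) (fun d p => d.getD p.1 0 + p.2)
    PySem.Dict.empty (by rw [PySem.Dict.keys_empty]; exact List.nodup_nil)

theorem pv_values_all_iff (L : List (Int × Int)) :
    ((pvSumKV L PySem.Dict.empty).values.all (fun v => v ≤ 1) = true) ↔
      ∀ k ∈ L.map (·.1), pvBSum L k ≤ 1 := by
  rw [PySem.Dict.values_eq_map_keys _ (pv_nodup_keys_sumKV L) 0, List.all_map, List.all_eq_true]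
  constructor
  · intro h k hk
    have hk' : k ∈ (pvSumKV L PySem.Dict.empty).keys := by
      rw [pv_keys_sumKV]
      exact (PySem.Set.mem_ofList _ _).2 hk
    have := h k hk'
    simp only [Function.comp, pv_getD_sumKV, PySem.Dict.getD_empty, zero_add,
      decide_eq_true_eq] at this
    exact this
  · intro h k hk
    have hk' : k ∈ L.map (·.1) := by
      rw [pv_keys_sumKV] at hk
      exact (PySem.Set.mem_ofList _ _).1 hk
    simp only [Function.comp, pv_getD_sumKV, PySem.Dict.getD_empty, zero_add,
      decide_eq_true_eq]
    exact h k hk'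

theorem pv_bsum_kv (key : Int × Int → Int) (matrix : List (List Int)) (k : Int) :
    pvBSum (pvKV key matrix) k
      = (((pvCells matrix).filter (fun p => key p == k)).map (pvG matrix)).sum := by
  unfold pvBSum pvKV
  rw [List.filter_map, List.map_map]
  rfl

-- ---- B's program equals the two pvSumKV folds ----
theorem pv_alt_eq (matrix : List (List Int)) :
    no_diagonal_attacks_alt matrix
      = ((pvSumKV (pvKV (fun p => p.1 + p.2) matrix) PySem.Dict.empty).values.all (fun v => v ≤ 1)
         && (pvSumKV (pvKV (fun p => ((matrix.length : Int) - 1 - p.1) + p.2) matrix) PySem.Dict.empty).values.all (fun v => v ≤ 1)) := by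
  have hval : ∀ r c : Int, 0 ≤ c → c < pvLenR matrix r →
      PySem.List.pyGetD (PySem.List.slice (PySem.List.pyGetD matrix r []) none (some (matrix.length : Int))) c 0
        = pvG matrix (r, c) := by
    intro r c h0 h1
    have hs : PySem.List.slice (PySem.List.pyGetD matrix r []) none (some (matrix.length : Int))
        = (PySem.List.pyGetD matrix r []).take (matrix.length : Int).toNat :=
      PySem.List.slice_to _ (Int.natCast_nonneg _)
    unfold pvLenR at h1
    rw [hs] at h1 ⊢
    rw [PySem.List.pyGetD_eq_getElem (h0 := h0) (h1 := h1)]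
    have hlt : c.toNat < (PySem.List.pyGetD matrix r []).length := by
      rw [List.length_take] at h1; omega
    rw [List.getElem_take]
    unfold pvG
    dsimp only
    rw [PySem.List.pyGetD_eq_getElem (h0 := h0) (h1 := by omega)]
  -- the inner loop over one row, as a pair of independent key/value folds
  have hstep : ∀ (r : Int) (st : PySem.Dict Int Int × PySem.Dict Int Int),
      (PySem.List.enumerate
        (PySem.List.slice (PySem.List.pyGetD matrix r []) none (some (matrix.length : Int))) 0).foldl
        (pvBStep (matrix.length : Int) r) st
      = ((PySem.List.pyRange 0 (pvLenR matrix r) 1).foldl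
            (fun d c => d.insert (r + c) (d.getD (r + c) 0 + pvG matrix (r, c))) st.1,
         (PySem.List.pyRange 0 (pvLenR matrix r) 1).foldl
            (fun d c => d.insert (((matrix.length : Int) - 1 - r) + c)
              (d.getD (((matrix.length : Int) - 1 - r) + c) 0 + pvG matrix (r, c))) st.2) := by
    intro r st
    obtain ⟨a, b⟩ := st
    rw [PySem.List.enumerate_eq_map_pyRange
      (PySem.List.slice (PySem.List.pyGetD matrix r []) none (some (matrix.length : Int))) 0]
    rw [List.foldl_map]
    have hrange : PySem.List.pyRange 0
        (PySem.List.len (PySem.List.slice (PySem.List.pyGetD matrix r []) none (some (matrix.length : Int)))) 1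
        = PySem.List.pyRange 0 (pvLenR matrix r) 1 := by
      unfold pvLenR
      norm_num [PySem.List.len]
    rw [hrange]
    calc (PySem.List.pyRange 0 (pvLenR matrix r) 1).foldl
          (fun st c => pvBStep (matrix.length : Int) r st
            (c, PySem.List.pyGetD (PySem.List.slice (PySem.List.pyGetD matrix r []) none (some (matrix.length : Int))) c 0))
          (a, b)
        = (PySem.List.pyRange 0 (pvLenR matrix r) 1).foldl
          (fun st c =>
            (st.1.insert (r + c) (st.1.getD (r + c) 0 + pvG matrix (r, c)),
             st.2.insert (((matrix.length : Int) - 1 - r) + c)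
               (st.2.getD (((matrix.length : Int) - 1 - r) + c) 0 + pvG matrix (r, c))))
          (a, b) := by
          refine PySem.List.foldl_congr_mem _ _ _ _ ?_
          intro acc c hc
          rw [PySem.List.mem_pyRange_one] at hc
          have hv := hval r c hc.1 hc.2
          simp only [pvBStep]
          rw [hv]
      _ = _ := by
          exact PySem.List.foldl_prod_mk
            (fun (d : PySem.Dict Int Int) (c : Int) =>
              d.insert (r + c) (d.getD (r + c) 0 + pvG matrix (r, c)))
            (fun (d : PySem.Dict Int Int) (c : Int) =>
              d.insert (((matrix.length : Int) - 1 - r) + c)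
                (d.getD (((matrix.length : Int) - 1 - r) + c) 0 + pvG matrix (r, c)))
            (PySem.List.pyRange 0 (pvLenR matrix r) 1) a b
  -- the whole pair of dicts, as two pvSumKV folds
  have hflat : ∀ key : Int → Int → Int, ∀ rows : List Int, ∀ a : PySem.Dict Int Int,
      rows.foldl (fun a r => (PySem.List.pyRange 0 (pvLenR matrix r) 1).foldl
          (fun d c => d.insert (key r c) (d.getD (key r c) 0 + pvG matrix (r, c))) a) a
      = pvSumKV (rows.flatMap (fun r => (PySem.List.pyRange 0 (pvLenR matrix r) 1).map
          (fun c => (key r c, pvG matrix (r, c))))) a := by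
    intro key rows
    induction rows with
    | nil => intro a; rfl
    | cons r rows ih =>
        intro a
        rw [List.foldl_cons, ih, List.flatMap_cons]
        unfold pvSumKV
        rw [List.foldl_append, List.foldl_map]
  have hKV : ∀ key : Int × Int → Int,
      (PySem.List.pyRange 0 (matrix.length : Int) 1).flatMap
        (fun r => (PySem.List.pyRange 0 (pvLenR matrix r) 1).map
          (fun c => (key (r, c), pvG matrix (r, c))))
      = pvKV key matrix := by
    intro key
    unfold pvKV pvCells
    rw [List.map_flatMap]
    simp only [List.map_map]
    rfl
  have hbody : (PySem.List.pyRange 0 (matrix.length : Int) 1).foldl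
      (fun st r =>
        (PySem.List.enumerate
          (PySem.List.slice (PySem.List.pyGetD matrix r []) none (some (matrix.length : Int))) 0).foldl
          (pvBStep (matrix.length : Int) r) st)
      (PySem.Dict.empty, PySem.Dict.empty)
      = (pvSumKV (pvKV (fun p => p.1 + p.2) matrix) PySem.Dict.empty,
         pvSumKV (pvKV (fun p => ((matrix.length : Int) - 1 - p.1) + p.2) matrix) PySem.Dict.empty) := by
    have hfun : (fun (st : PySem.Dict Int Int × PySem.Dict Int Int) (r : Int) =>
        (PySem.List.enumerate
          (PySem.List.slice (PySem.List.pyGetD matrix r []) none (some (matrix.length : Int))) 0).foldl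
          (pvBStep (matrix.length : Int) r) st)
        = (fun (st : PySem.Dict Int Int × PySem.Dict Int Int) (r : Int) =>
          ((PySem.List.pyRange 0 (pvLenR matrix r) 1).foldl
              (fun d c => d.insert (r + c) (d.getD (r + c) 0 + pvG matrix (r, c))) st.1,
           (PySem.List.pyRange 0 (pvLenR matrix r) 1).foldl
              (fun d c => d.insert (((matrix.length : Int) - 1 - r) + c)
                (d.getD (((matrix.length : Int) - 1 - r) + c) 0 + pvG matrix (r, c))) st.2)) := by
      funext st r
      exact hstep r st
    rw [hfun]
    rw [PySem.List.foldl_prod_mk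
      (fun (a : PySem.Dict Int Int) (r : Int) =>
        (PySem.List.pyRange 0 (pvLenR matrix r) 1).foldl
          (fun d c => d.insert (r + c) (d.getD (r + c) 0 + pvG matrix (r, c))) a)
      (fun (b : PySem.Dict Int Int) (r : Int) =>
        (PySem.List.pyRange 0 (pvLenR matrix r) 1).foldl
          (fun d c => d.insert (((matrix.length : Int) - 1 - r) + c)
            (d.getD (((matrix.length : Int) - 1 - r) + c) 0 + pvG matrix (r, c))) b)
      (PySem.List.pyRange 0 (matrix.length : Int) 1) PySem.Dict.empty PySem.Dict.empty]
    rw [hflat (fun r c => r + c), hflat (fun r c => ((matrix.length : Int) - 1 - r) + c)]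
    rw [hKV (fun p => p.1 + p.2), hKV (fun p => ((matrix.length : Int) - 1 - p.1) + p.2)]
  show (((PySem.List.pyRange 0 (matrix.length : Int) 1).foldl
      (fun st r =>
        (PySem.List.enumerate
          (PySem.List.slice (PySem.List.pyGetD matrix r []) none (some (matrix.length : Int))) 0).foldl
          (pvBStep (matrix.length : Int) r) st)
      (PySem.Dict.empty, PySem.Dict.empty)).1.values.all (fun v => v ≤ 1)
    && ((PySem.List.pyRange 0 (matrix.length : Int) 1).foldl
      (fun st r =>
        (PySem.List.enumerate
          (PySem.List.slice (PySem.List.pyGetD matrix r []) none (some (matrix.length : Int))) 0).foldl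
          (pvBStep (matrix.length : Int) r) st)
      (PySem.Dict.empty, PySem.Dict.empty)).2.values.all (fun v => v ≤ 1))
    = ((pvSumKV (pvKV (fun p => p.1 + p.2) matrix) PySem.Dict.empty).values.all (fun v => v ≤ 1)
       && (pvSumKV (pvKV (fun p => ((matrix.length : Int) - 1 - p.1) + p.2) matrix) PySem.Dict.empty).values.all (fun v => v ≤ 1))
  rw [hbody]

theorem pvB_true_iff (matrix : List (List Int)) :
    no_diagonal_attacks_alt matrix = true ↔
      ((∀ k ∈ (pvKV (fun p => p.1 + p.2) matrix).map (·.1),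
          pvBSum (pvKV (fun p => p.1 + p.2) matrix) k ≤ 1) ∧
       (∀ k ∈ (pvKV (fun p => ((matrix.length : Int) - 1 - p.1) + p.2) matrix).map (·.1),
          pvBSum (pvKV (fun p => ((matrix.length : Int) - 1 - p.1) + p.2) matrix) k ≤ 1)) := by
  rw [pv_alt_eq, Bool.and_eq_true, pv_values_all_iff, pv_values_all_iff]

-- ---- the cells B visits ----
theorem pv_mem_cells (matrix : List (List Int)) (p : Int × Int) :
    p ∈ pvCells matrix ↔
      0 ≤ p.1 ∧ p.1 < (matrix.length : Int) ∧ 0 ≤ p.2 ∧ p.2 < pvLenR matrix p.1 := by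
  unfold pvCells
  rw [List.mem_flatMap]
  constructor
  · rintro ⟨r, hr, hp⟩
    rw [List.mem_map] at hp
    obtain ⟨c, hc, rfl⟩ := hp
    rw [PySem.List.mem_pyRange_one] at hr hc
    dsimp only
    exact ⟨hr.1, hr.2, hc.1, hc.2⟩
  · rintro ⟨h1, h2, h3, h4⟩
    refine ⟨p.1, ?_, ?_⟩
    · rw [PySem.List.mem_pyRange_one]; exact ⟨h1, h2⟩
    · rw [List.mem_map]
      exact ⟨p.2, by rw [PySem.List.mem_pyRange_one]; exact ⟨h3, h4⟩, by cases p; rfl⟩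

theorem pv_nodup_cells (matrix : List (List Int)) : (pvCells matrix).Nodup := by
  unfold pvCells
  refine List.nodup_flatMap.2 ⟨?_, ?_⟩
  · intro r _
    refine (PySem.List.nodup_pyRange_one _ _).map ?_
    intro a b hab
    simpa using hab
  · refine (PySem.List.nodup_pyRange_one 0 _).imp ?_
    intro r r' hne x hx hx'
    rw [List.mem_map] at hx hx'
    obtain ⟨c, _, rfl⟩ := hx
    obtain ⟨c', _, h⟩ := hx'
    simp only [Prod.mk.injEq] at h
    exact hne h.1.symm

-- ---- the main theorem ----
theorem pv_main (matrix : List (List Int)) (hpre : Pre_no_diagonal_attacks matrix) :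
    no_diagonal_attacks matrix = no_diagonal_attacks_alt matrix := by
  rcases hpre with hsq | ⟨hne, hr0, hm⟩
  · -- square case: A = B because each diagonal of A is a permutation of B's bucket
    have hlen : ∀ r : Int, 0 ≤ r → r < (matrix.length : Int) →
        pvLenR matrix r = (matrix.length : Int) := by
      intro r h0 h1
      unfold pvLenR
      rw [PySem.List.slice_to (PySem.List.pyGetD matrix r []) (Int.natCast_nonneg _)]
      have hrow : PySem.List.pyGetD matrix r [] ∈ matrix := by
        rw [PySem.List.pyGetD_eq_getElem (h0 := h0) (h1 := h1)]
        exact List.getElem_mem _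
      have := hsq _ hrow
      rw [List.length_take]
      push_cast
      omega
    have hmemc : ∀ p : Int × Int, p ∈ pvCells matrix ↔
        0 ≤ p.1 ∧ p.1 < (matrix.length : Int) ∧ 0 ≤ p.2 ∧ p.2 < (matrix.length : Int) := by
      intro p
      rw [pv_mem_cells]
      constructor
      · rintro ⟨h1, h2, h3, h4⟩
        rw [hlen p.1 h1 h2] at h4
        exact ⟨h1, h2, h3, h4⟩
      · rintro ⟨h1, h2, h3, h4⟩
        rw [← hlen p.1 h1 h2] at h4
        exact ⟨h1, h2, h3, h4⟩
    have hperm_ne : ∀ d : Int, (pvNePositions (matrix.length : Int) d).Perm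
        ((pvCells matrix).filter (fun p => p.1 + p.2 == d)) := by
      intro d
      rw [List.perm_ext_iff_of_nodup (pv_nodup_nePositions _ d)
        ((pv_nodup_cells matrix).filter _)]
      intro q
      rw [pv_mem_nePositions, List.mem_filter, hmemc, beq_iff_eq]
      omega
    have hperm_se : ∀ d : Int, (pvSePositions (matrix.length : Int) d).Perm
        ((pvCells matrix).filter (fun p => ((matrix.length : Int) - 1 - p.1) + p.2 == d)) := by
      intro d
      rw [List.perm_ext_iff_of_nodup (pv_nodup_sePositions _ d)
        ((pv_nodup_cells matrix).filter _)]
      intro q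
      rw [pv_mem_sePositions, List.mem_filter, hmemc, beq_iff_eq]
      omega
    have hsum_ne : ∀ d : Int, (pvDiag matrix (pvNePositions (matrix.length : Int) d)).sum
        = pvBSum (pvKV (fun p => p.1 + p.2) matrix) d := by
      intro d
      rw [pv_bsum_kv]
      exact ((hperm_ne d).map (pvG matrix)).sum_eq
    have hsum_se : ∀ d : Int, (pvDiag matrix (pvSePositions (matrix.length : Int) d)).sum
        = pvBSum (pvKV (fun p => ((matrix.length : Int) - 1 - p.1) + p.2) matrix) d := by
      intro d
      rw [pv_bsum_kv]
      exact ((hperm_se d).map (pvG matrix)).sum_eq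
    have hkmem : ∀ (key : Int × Int → Int) (k : Int),
        k ∈ (pvKV key matrix).map (·.1) ↔ ∃ p ∈ pvCells matrix, key p = k := by
      intro key k
      unfold pvKV
      rw [List.map_map]
      constructor
      · intro hk
        rw [List.mem_map] at hk
        obtain ⟨p, hp, h⟩ := hk
        exact ⟨p, hp, h⟩
      · rintro ⟨p, hp, h⟩
        exact List.mem_map.2 ⟨p, hp, h⟩
    rw [Bool.eq_iff_iff, pvA_true_iff, pvB_true_iff]
    constructor
    · rintro h
      constructor
      · intro k hk
        rw [hkmem] at hk
        obtain ⟨p, hp, rfl⟩ := hk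
        rw [hmemc] at hp
        have hd : p.1 + p.2 ∈ PySem.List.pyRange 0 (2 * (matrix.length : Int) - 1) 1 := by
          rw [PySem.List.mem_pyRange_one]; omega
        rw [← hsum_ne]
        exact (h _ hd).1
      · intro k hk
        rw [hkmem] at hk
        obtain ⟨p, hp, rfl⟩ := hk
        rw [hmemc] at hp
        have hd : ((matrix.length : Int) - 1 - p.1) + p.2
            ∈ PySem.List.pyRange 0 (2 * (matrix.length : Int) - 1) 1 := by
          rw [PySem.List.mem_pyRange_one]; omega
        rw [← hsum_se]
        exact (h _ hd).2
    · rintro ⟨h1, h2⟩ d hd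
      constructor
      · by_cases hk : d ∈ (pvKV (fun p => p.1 + p.2) matrix).map (·.1)
        · rw [hsum_ne]; exact h1 d hk
        · rw [hsum_ne, pv_bsum_kv]
          have : (pvCells matrix).filter (fun p => p.1 + p.2 == d) = [] := by
            rw [List.filter_eq_nil_iff]
            intro p hp hpd
            exact hk ((hkmem _ d).2 ⟨p, hp, by rwa [beq_iff_eq] at hpd⟩)
          rw [this]
          simp
      · by_cases hk : d ∈ (pvKV (fun p => ((matrix.length : Int) - 1 - p.1) + p.2) matrix).map (·.1)
        · rw [hsum_se]; exact h2 d hk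
        · rw [hsum_se, pv_bsum_kv]
          have : (pvCells matrix).filter (fun p => ((matrix.length : Int) - 1 - p.1) + p.2 == d) = [] := by
            rw [List.filter_eq_nil_iff]
            intro p hp hpd
            exact hk ((hkmem _ d).2 ⟨p, hp, by rwa [beq_iff_eq] at hpd⟩)
          rw [this]
          simp
  · -- first-cell case: both programs report False because diagonal 0 already sums above 1
    obtain ⟨r0, rest, rfl⟩ := List.exists_cons_of_ne_nil hne
    simp only [List.headD_cons] at hr0 hm
    obtain ⟨v, vs, rfl⟩ := List.exists_cons_of_ne_nil hr0
    have hnlen : (1 : Int) ≤ (((v :: vs) :: rest).length : Int) := by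
      simp only [List.length_cons]
      push_cast
      omega
    have hv : pvG ((v :: vs) :: rest) (0, 0) = v := by
      unfold pvG
      rw [PySem.List.pyGetD_zero_cons, PySem.List.pyGetD_zero_cons]
    have hm' : 1 < v := by simpa using hm
    have hA : no_diagonal_attacks ((v :: vs) :: rest) = false := by
      unfold no_diagonal_attacks
      rw [PySem.List.pyRange_one_cons (by omega)]
      have hpos : pvNePositions ((((v :: vs) :: rest).length : Int)) 0 = [(0, 0)] := by
        unfold pvNePositions
        rw [if_pos (by omega)]
        rw [pvNeLoop1, dif_pos (by norm_num)]
        rw [pvNeLoop1, dif_neg (by norm_num [pvAddvec])]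
      rw [pvALoop, hpos]
      rw [if_pos (by simpa [pvDiag, hv] using hm')]
    have hcell : ((0 : Int), (0 : Int)) ∈ pvCells ((v :: vs) :: rest) := by
      rw [pv_mem_cells]
      refine ⟨le_refl 0, by omega, le_refl 0, ?_⟩
      unfold pvLenR
      rw [PySem.List.slice_to _ (Int.natCast_nonneg _)]
      rw [PySem.List.pyGetD_zero_cons, List.length_take]
      simp only [List.length_cons]
      push_cast
      omega
    have hfilter : (pvCells ((v :: vs) :: rest)).filter (fun p => p.1 + p.2 == 0)
        = [((0 : Int), (0 : Int))] := by
      refine List.perm_singleton.1 ?_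
      rw [List.perm_ext_iff_of_nodup ((pv_nodup_cells _).filter _) (List.nodup_singleton _)]
      intro q
      rw [List.mem_filter, List.mem_singleton, beq_iff_eq]
      constructor
      · rintro ⟨hq, hq0⟩
        rw [pv_mem_cells] at hq
        rw [Prod.ext_iff]
        dsimp only
        omega
      · rintro rfl
        exact ⟨hcell, rfl⟩
    have hB : no_diagonal_attacks_alt ((v :: vs) :: rest) = false := by
      have : ¬ (no_diagonal_attacks_alt ((v :: vs) :: rest) = true) := by
        rw [pvB_true_iff]
        rintro ⟨hNE, _⟩
        have hk : (0 : Int) ∈ (pvKV (fun p => p.1 + p.2) ((v :: vs) :: rest)).map (·.1) := by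
          unfold pvKV
          rw [List.map_map]
          refine List.mem_map.2 ⟨((0 : Int), (0 : Int)), hcell, rfl⟩
        have := hNE 0 hk
        rw [pv_bsum_kv, hfilter] at this
        simp only [List.map_cons, List.map_nil, List.sum_cons, List.sum_nil, add_zero, hv] at this
        omega
      exact Bool.eq_false_iff.2 this
    rw [hA, hB]

-- ===== VERDICT (by name: the statement is the Claim_ definition above) =====
theorem no_diagonal_attacks_spec : Claim_equal_no_diagonal_attacks := by
  intro matrix _ hpre
  unfold Spec_no_diagonal_attacks
  exact pv_main matrix hpre
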